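-- pv_equiv track=rewrite | github.com/Narukodo/Advent-of-Code-2023 | day14.py | construct_plate
-- ===== SOURCE A (Python) =====
-- def construct_plate(rocks, length, width):
--     new_plate = []
--     load = 0
--     for i in range(length):
--         row = ''
--         for j in range(width):
--             is_rock = False
--             for rock in rocks:
--                 if rock[0] == i and rock[1] == j:
--                     row += rock[2]
--                     if rock[2] == 'O':
--                         load += length - rock[0]
--                     is_rock = True
--             if not is_rock:
--                 row += '.'
--         new_plate.append(row)
--     return new_plate, load
-- ===== SOURCE B (Python) =====
-- def construct_plate(rocks, length, width):
--     # Index the rocks once: (i, j) -> cell string, the set of rows holding a rock,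
--     # and the total load; then render, reusing one all-dots row for rock-free rows.
--     cells = {}
--     rocky_rows = set()
--     load = 0
--     for rock in rocks:
--         i, j, c = rock[0], rock[1], rock[2]
--         if 0 <= i < length and 0 <= j < width:
--             cells[(i, j)] = cells.get((i, j), '') + c
--             rocky_rows.add(i)
--             if c == 'O':
--                 load += length - i
--     empty = '.' * width if length > 0 else ''
--     new_plate = [''.join(cells.get((i, j), '.') for j in range(width)) if i in rocky_rows else empty
--                  for i in range(length)]
--     return new_plate, load
-- ===== Notes on version B (the rewrite author's own statement) =====
-- stated objective: faster
-- what changed: Instead of scanning the whole rock list for every grid cell, B makes one pass over the rocks building a dict keyed by (i,j) (concatenating duplicate-cell symbols in order), the set of rows holding a rock, and the load, then renders rock-free rows as one shared '.'*width string and rocky rows by direct dict lookups.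
import Mathlib
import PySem

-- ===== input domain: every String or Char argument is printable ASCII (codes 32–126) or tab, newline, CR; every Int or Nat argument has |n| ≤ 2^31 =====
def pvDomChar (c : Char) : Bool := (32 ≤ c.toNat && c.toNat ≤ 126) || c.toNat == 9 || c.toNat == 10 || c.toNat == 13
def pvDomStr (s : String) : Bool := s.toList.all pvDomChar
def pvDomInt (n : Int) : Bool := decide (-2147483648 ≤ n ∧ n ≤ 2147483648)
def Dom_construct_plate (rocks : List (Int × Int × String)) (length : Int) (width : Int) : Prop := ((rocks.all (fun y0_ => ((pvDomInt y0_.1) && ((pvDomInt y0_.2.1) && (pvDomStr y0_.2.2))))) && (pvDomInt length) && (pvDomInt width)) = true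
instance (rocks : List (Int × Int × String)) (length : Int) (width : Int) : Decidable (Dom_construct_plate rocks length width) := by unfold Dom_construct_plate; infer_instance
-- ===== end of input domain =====

-- B replaces A's per-cell scan of the whole rock list by one dict-building pass over the
-- rocks followed by a direct-lookup rendering pass (objective: faster).

-- ===== PORT A =====
def construct_plate (rocks : List (Int × Int × String)) (length : Int) (width : Int) : List String × Int :=
  (PySem.List.pyRange 0 length 1).foldl (fun (st : List String × Int) i =>
    let inner := (PySem.List.pyRange 0 width 1).foldl (fun (st2 : String × Int) j =>
      let st3 := rocks.foldl (fun (st3 : String × Int × Bool) rock =>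
        if rock.1 = i ∧ rock.2.1 = j then
          (st3.1 ++ rock.2.2,
           (if rock.2.2 = "O" then st3.2.1 + (length - rock.1) else st3.2.1),
           true)
        else st3) (st2.1, st2.2, false)
      (if st3.2.2 then st3.1 else st3.1 ++ ".", st3.2.1)) ("", st.2)
    (st.1 ++ [inner.1], inner.2)) ([], 0)

-- ===== PORT B =====
def construct_plate_alt (rocks : List (Int × Int × String)) (length : Int) (width : Int) : List String × Int :=
  let st := rocks.foldl (fun (st : PySem.Dict (Int × Int) String × PySem.Set Int × Int) rock =>
    if 0 ≤ rock.1 ∧ rock.1 < length ∧ 0 ≤ rock.2.1 ∧ rock.2.1 < width then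
      (st.1.insert (rock.1, rock.2.1) (st.1.getD (rock.1, rock.2.1) "" ++ rock.2.2),
       PySem.Set.add st.2.1 rock.1,
       if rock.2.2 = "O" then st.2.2 + (length - rock.1) else st.2.2)
    else st) (PySem.Dict.empty, PySem.Set.ofList [], 0)
  -- '.' * width ported by hand: width.toNat copies of "." (exact: Python repetition clamps a negative count to 0)
  let empty := if 0 < length then String.join (List.replicate width.toNat ".") else ""
  ((PySem.List.pyRange 0 length 1).map (fun i =>
      if i ∈ st.2.1 then
        String.join ((PySem.List.pyRange 0 width 1).map (fun j => st.1.getD (i, j) "."))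
      else empty),
   st.2.2)

-- ===== PRECONDITION & SPEC =====
def Spec_construct_plate (rocks : List (Int × Int × String)) (length : Int) (width : Int) (out : List String × Int) : Prop := out = construct_plate_alt rocks length width
instance (rocks : List (Int × Int × String)) (length : Int) (width : Int) (out : List String × Int) : Decidable (Spec_construct_plate rocks length width out) := by unfold Spec_construct_plate; infer_instance

-- ===== CLAIM (what is proved, stated in full; the proofs are below) =====
def Claim_equal_construct_plate : Prop := ∀ (rocks : List (Int × Int × String)) (length : Int) (width : Int), Dom_construct_plate rocks length width → Spec_construct_plate rocks length width (construct_plate rocks length width)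

-- ===== LEMMAS AND PROOFS =====

-- the rocks that land on cell (i, j), in list order
def pvMatches (rocks : List (Int × Int × String)) (i j : Int) : List (Int × Int × String) :=
  rocks.filter (fun r => decide (r.1 = i ∧ r.2.1 = j))

-- cell content of (i, j) as both programs render it
def pvCell (rocks : List (Int × Int × String)) (i j : Int) : String :=
  if pvMatches rocks i j = [] then "." else String.join ((pvMatches rocks i j).map (·.2.2))

-- load contribution of one rock (when it lies on the plate)
def pvH (length : Int) (r : Int × Int × String) : Int :=
  if r.2.2 = "O" then length - r.1 else 0

-- load contribution of cell (i, j)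
def pvC (rocks : List (Int × Int × String)) (length i j : Int) : Int :=
  ((pvMatches rocks i j).map (pvH length)).sum

theorem pvStrFoldl (u : List String) : ∀ a : String, u.foldl (· ++ ·) a = a ++ String.join u := by
  induction u with
  | nil => intro a; simp [String.join]
  | cons s t ih =>
      intro a
      have hj : String.join (s :: t) = s ++ String.join t := by
        show t.foldl (· ++ ·) ("" ++ s) = _
        rw [ih]; simp
      show t.foldl (· ++ ·) (a ++ s) = a ++ String.join (s :: t)
      rw [ih, hj, String.append_assoc]

theorem pvJoin_cons (s : String) (t : List String) :
    String.join (s :: t) = s ++ String.join t := by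
  show t.foldl (· ++ ·) ("" ++ s) = _
  rw [pvStrFoldl]; simp

theorem pvFoldlAppendStr {α : Type} (l : List α) (f : α → String) (a : String) :
    l.foldl (fun acc x => acc ++ f x) a = a ++ String.join (l.map f) := by
  rw [← List.foldl_map, pvStrFoldl]

-- A's innermost loop, restricted to the rocks of the current cell
theorem pvA_inner (l : List (Int × Int × String)) (length : Int) :
    ∀ (row : String) (load : Int) (b : Bool),
    l.foldl (fun (st3 : String × Int × Bool) rock =>
        (st3.1 ++ rock.2.2,
         (if rock.2.2 = "O" then st3.2.1 + (length - rock.1) else st3.2.1),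
         true)) (row, load, b)
    = (row ++ String.join (l.map (·.2.2)), load + (l.map (pvH length)).sum, b || !l.isEmpty) := by
  induction l with
  | nil => intro row load b; simp [String.join]
  | cons r t ih =>
      intro row load b
      simp only [List.foldl_cons, ih, List.map_cons, List.sum_cons, pvJoin_cons,
        List.isEmpty_cons, Prod.mk.injEq]
      refine ⟨by rw [String.append_assoc], ?_, by simp⟩
      unfold pvH; split_ifs <;> omega

-- A's middle loop: one row and its load contribution
theorem pvRowLem (rocks : List (Int × Int × String)) (length width i : Int) (load0 : Int) :
    (PySem.List.pyRange 0 width 1).foldl (fun (st2 : String × Int) j =>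
      let st3 := rocks.foldl (fun (st3 : String × Int × Bool) rock =>
        if rock.1 = i ∧ rock.2.1 = j then
          (st3.1 ++ rock.2.2,
           (if rock.2.2 = "O" then st3.2.1 + (length - rock.1) else st3.2.1),
           true)
        else st3) (st2.1, st2.2, false)
      (if st3.2.2 then st3.1 else st3.1 ++ ".", st3.2.1)) ("", load0)
    = (String.join ((PySem.List.pyRange 0 width 1).map (pvCell rocks i)),
       load0 + ((PySem.List.pyRange 0 width 1).map (pvC rocks length i)).sum) := by
  have hbody : (fun (st2 : String × Int) (j : Int) =>
      let st3 := rocks.foldl (fun (st3 : String × Int × Bool) rock =>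
        if rock.1 = i ∧ rock.2.1 = j then
          (st3.1 ++ rock.2.2,
           (if rock.2.2 = "O" then st3.2.1 + (length - rock.1) else st3.2.1),
           true)
        else st3) (st2.1, st2.2, false)
      ((if st3.2.2 then st3.1 else st3.1 ++ "."), st3.2.1))
      = fun (st2 : String × Int) (j : Int) => (st2.1 ++ pvCell rocks i j, st2.2 + pvC rocks length i j) := by
    funext st2 j
    show ((if (rocks.foldl (fun (st3 : String × Int × Bool) rock =>
        if rock.1 = i ∧ rock.2.1 = j then
          (st3.1 ++ rock.2.2,
           (if rock.2.2 = "O" then st3.2.1 + (length - rock.1) else st3.2.1),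
           true)
        else st3) (st2.1, st2.2, false)).2.2 then _ else _), _) = _
    rw [PySem.List.foldl_ite_eq_foldl_filter
      (p := fun r : Int × Int × String => r.1 = i ∧ r.2.1 = j)
      (f := fun (st3 : String × Int × Bool) rock =>
        (st3.1 ++ rock.2.2,
         (if rock.2.2 = "O" then st3.2.1 + (length - rock.1) else st3.2.1),
         true))]
    rw [pvA_inner]
    simp only [Bool.false_or]
    show _ = (st2.1 ++ pvCell rocks i j, st2.2 + pvC rocks length i j)
    unfold pvCell pvC pvMatches
    have hdec : (fun r : Int × Int × String => decide (r.1 = i ∧ r.2.1 = j))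
        = (fun x : Int × Int × String => decide (x.1 = i) && decide (x.2.1 = j)) := by
      funext r; simp
    rw [hdec]
    by_cases h : rocks.filter (fun x : Int × Int × String => decide (x.1 = i) && decide (x.2.1 = j)) = []
    · simp [h, String.join]
    · simp [h, List.isEmpty_iff]
  rw [hbody]
  rw [PySem.List.foldl_prod_mk (f := fun (row : String) j => row ++ pvCell rocks i j)
        (g := fun (load : Int) j => load + pvC rocks length i j)]
  rw [pvFoldlAppendStr, PySem.List.foldl_add]
  simp

-- characterization of A's result
theorem pvA_char (rocks : List (Int × Int × String)) (length width : Int) :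
    construct_plate rocks length width
    = ((PySem.List.pyRange 0 length 1).map (fun i => String.join ((PySem.List.pyRange 0 width 1).map (pvCell rocks i))),
       ((PySem.List.pyRange 0 length 1).map (fun i => ((PySem.List.pyRange 0 width 1).map (pvC rocks length i)).sum)).sum) := by
  unfold construct_plate
  have hbody : (fun (st : List String × Int) (i : Int) =>
      let inner := (PySem.List.pyRange 0 width 1).foldl (fun (st2 : String × Int) j =>
        let st3 := rocks.foldl (fun (st3 : String × Int × Bool) rock =>
          if rock.1 = i ∧ rock.2.1 = j then
            (st3.1 ++ rock.2.2,
             (if rock.2.2 = "O" then st3.2.1 + (length - rock.1) else st3.2.1),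
             true)
          else st3) (st2.1, st2.2, false)
        ((if st3.2.2 then st3.1 else st3.1 ++ "."), st3.2.1)) ("", st.2)
      (st.1 ++ [inner.1], inner.2))
      = fun (st : List String × Int) (i : Int) =>
          (st.1 ++ [String.join ((PySem.List.pyRange 0 width 1).map (pvCell rocks i))],
           st.2 + ((PySem.List.pyRange 0 width 1).map (pvC rocks length i)).sum) := by
    funext st i
    show ((st.1 ++ [((PySem.List.pyRange 0 width 1).foldl (fun (st2 : String × Int) j =>
        let st3 := rocks.foldl (fun (st3 : String × Int × Bool) rock =>
          if rock.1 = i ∧ rock.2.1 = j then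
            (st3.1 ++ rock.2.2,
             (if rock.2.2 = "O" then st3.2.1 + (length - rock.1) else st3.2.1),
             true)
          else st3) (st2.1, st2.2, false)
        ((if st3.2.2 then st3.1 else st3.1 ++ "."), st3.2.1)) ("", st.2)).1], _)) = _
    rw [pvRowLem rocks length width i st.2]
  rw [hbody]
  rw [PySem.List.foldl_prod_mk
        (f := fun (pl : List String) i => pl ++ [String.join ((PySem.List.pyRange 0 width 1).map (pvCell rocks i))])
        (g := fun (load : Int) i => load + ((PySem.List.pyRange 0 width 1).map (pvC rocks length i)).sum)]
  rw [PySem.List.foldl_append_singleton_eq_map, PySem.List.foldl_add]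
  simp

-- B's dict after the building pass, looked up at an in-range cell
theorem pvB_dict_get (length width : Int) (rocks : List (Int × Int × String)) :
    ∀ (d : PySem.Dict (Int × Int) String) (i j : Int),
    0 ≤ i → i < length → 0 ≤ j → j < width →
    (rocks.foldl (fun (d : PySem.Dict (Int × Int) String) rock =>
        if 0 ≤ rock.1 ∧ rock.1 < length ∧ 0 ≤ rock.2.1 ∧ rock.2.1 < width then
          d.insert (rock.1, rock.2.1) (d.getD (rock.1, rock.2.1) "" ++ rock.2.2)
        else d) d).get? (i, j)
    = if pvMatches rocks i j = [] then d.get? (i, j)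
      else some (d.getD (i, j) "" ++ String.join ((pvMatches rocks i j).map (·.2.2))) := by
  induction rocks with
  | nil => intro d i j _ _ _ _; simp [pvMatches]
  | cons r t ih =>
      intro d i j hi1 hi2 hj1 hj2
      by_cases hm : r.1 = i ∧ r.2.1 = j
      · -- r lands on (i, j), hence is in range
        obtain ⟨h1, h2⟩ := hm
        have hir : 0 ≤ r.1 ∧ r.1 < length ∧ 0 ≤ r.2.1 ∧ r.2.1 < width := by
          refine ⟨by omega, by omega, by omega, by omega⟩
        have hkey : (r.1, r.2.1) = (i, j) := by rw [h1, h2]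
        simp only [List.foldl_cons, if_pos hir, hkey]
        rw [ih _ i j hi1 hi2 hj1 hj2]
        have hmc : pvMatches (r :: t) i j = r :: pvMatches t i j := by
          simp [pvMatches, h1, h2]
        rw [hmc]
        by_cases he : pvMatches t i j = []
        · simp [he, PySem.Dict.get?_insert_self, String.join]
        · simp only [he, List.map_cons, pvJoin_cons]
          rw [PySem.Dict.getD_insert_self]
          simp [String.append_assoc]
      · -- r does not land on (i, j)
        have hmc : pvMatches (r :: t) i j = pvMatches t i j := by
          simp [pvMatches, hm]
        by_cases hir : 0 ≤ r.1 ∧ r.1 < length ∧ 0 ≤ r.2.1 ∧ r.2.1 < width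
        · have hne : ((i, j) : Int × Int) ≠ (r.1, r.2.1) := by
            intro hc
            apply hm
            constructor
            · exact (Prod.mk.injEq _ _ _ _ ▸ hc).1.symm
            · exact (Prod.mk.injEq _ _ _ _ ▸ hc).2.symm
          simp only [List.foldl_cons, if_pos hir]
          rw [ih _ i j hi1 hi2 hj1 hj2, hmc]
          rw [PySem.Dict.get?_insert_of_ne _ _ hne, PySem.Dict.getD_insert_of_ne _ _ _ hne]
        · simp only [List.foldl_cons, if_neg hir]
          rw [ih _ i j hi1 hi2 hj1 hj2, hmc]

-- characterization of B's result
theorem pvB_char (rocks : List (Int × Int × String)) (length width : Int) :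
    construct_plate_alt rocks length width
    = ((PySem.List.pyRange 0 length 1).map (fun i => String.join ((PySem.List.pyRange 0 width 1).map (pvCell rocks i))),
       (rocks.map (fun r => if 0 ≤ r.1 ∧ r.1 < length ∧ 0 ≤ r.2.1 ∧ r.2.1 < width then pvH length r else 0)).sum) := by
  unfold construct_plate_alt
  have hb : (fun (st : PySem.Dict (Int × Int) String × PySem.Set Int × Int) (rock : Int × Int × String) =>
      if 0 ≤ rock.1 ∧ rock.1 < length ∧ 0 ≤ rock.2.1 ∧ rock.2.1 < width then
        (st.1.insert (rock.1, rock.2.1) (st.1.getD (rock.1, rock.2.1) "" ++ rock.2.2),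
         PySem.Set.add st.2.1 rock.1,
         if rock.2.2 = "O" then st.2.2 + (length - rock.1) else st.2.2)
      else st)
      = fun (st : PySem.Dict (Int × Int) String × PySem.Set Int × Int) (rock : Int × Int × String) =>
        ((if 0 ≤ rock.1 ∧ rock.1 < length ∧ 0 ≤ rock.2.1 ∧ rock.2.1 < width then
            st.1.insert (rock.1, rock.2.1) (st.1.getD (rock.1, rock.2.1) "" ++ rock.2.2) else st.1),
         (fun (p : PySem.Set Int × Int) (rock : Int × Int × String) =>
           ((if 0 ≤ rock.1 ∧ rock.1 < length ∧ 0 ≤ rock.2.1 ∧ rock.2.1 < width then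
               PySem.Set.add p.1 rock.1 else p.1),
            (if 0 ≤ rock.1 ∧ rock.1 < length ∧ 0 ≤ rock.2.1 ∧ rock.2.1 < width then
               (if rock.2.2 = "O" then p.2 + (length - rock.1) else p.2) else p.2))) st.2 rock) := by
    funext st rock
    by_cases h : 0 ≤ rock.1 ∧ rock.1 < length ∧ 0 ≤ rock.2.1 ∧ rock.2.1 < width <;> simp [h]
  rw [hb]
  rw [PySem.List.foldl_prod_mk
      (f := fun (d : PySem.Dict (Int × Int) String) (rock : Int × Int × String) =>
        if 0 ≤ rock.1 ∧ rock.1 < length ∧ 0 ≤ rock.2.1 ∧ rock.2.1 < width then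
          d.insert (rock.1, rock.2.1) (d.getD (rock.1, rock.2.1) "" ++ rock.2.2) else d)
      (g := fun (p : PySem.Set Int × Int) (rock : Int × Int × String) =>
        ((if 0 ≤ rock.1 ∧ rock.1 < length ∧ 0 ≤ rock.2.1 ∧ rock.2.1 < width then
            PySem.Set.add p.1 rock.1 else p.1),
         (if 0 ≤ rock.1 ∧ rock.1 < length ∧ 0 ≤ rock.2.1 ∧ rock.2.1 < width then
            (if rock.2.2 = "O" then p.2 + (length - rock.1) else p.2) else p.2)))]
  rw [PySem.List.foldl_prod_mk
      (f := fun (s : PySem.Set Int) (rock : Int × Int × String) =>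
        if 0 ≤ rock.1 ∧ rock.1 < length ∧ 0 ≤ rock.2.1 ∧ rock.2.1 < width then
          PySem.Set.add s rock.1 else s)
      (g := fun (load : Int) (rock : Int × Int × String) =>
        if 0 ≤ rock.1 ∧ rock.1 < length ∧ 0 ≤ rock.2.1 ∧ rock.2.1 < width then
          (if rock.2.2 = "O" then load + (length - rock.1) else load) else load)]
  have hS : ∀ y : Int, (y ∈ rocks.foldl (fun (s : PySem.Set Int) (rock : Int × Int × String) =>
        if 0 ≤ rock.1 ∧ rock.1 < length ∧ 0 ≤ rock.2.1 ∧ rock.2.1 < width then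
          PySem.Set.add s rock.1 else s) (PySem.Set.ofList []))
      ↔ ∃ r ∈ rocks.filter (fun r : Int × Int × String =>
            decide (0 ≤ r.1 ∧ r.1 < length ∧ 0 ≤ r.2.1 ∧ r.2.1 < width)), y = r.1 := by
    intro y
    rw [PySem.List.foldl_ite_eq_foldl_filter
      (p := fun r : Int × Int × String => 0 ≤ r.1 ∧ r.1 < length ∧ 0 ≤ r.2.1 ∧ r.2.1 < width)
      (f := fun (s : PySem.Set Int) (rock : Int × Int × String) => PySem.Set.add s rock.1)]
    rw [PySem.Set.mem_foldl_add]
    simp [PySem.Set.mem_ofList]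
  refine Prod.ext ?_ ?_
  · -- plate component
    show ((PySem.List.pyRange 0 length 1).map _) = _
    apply List.map_congr_left
    intro i hi
    have hi' := (PySem.List.mem_pyRange_one.mp hi)
    by_cases hrow : (i ∈ rocks.foldl (fun (s : PySem.Set Int) (rock : Int × Int × String) =>
        if 0 ≤ rock.1 ∧ rock.1 < length ∧ 0 ≤ rock.2.1 ∧ rock.2.1 < width then
          PySem.Set.add s rock.1 else s) (PySem.Set.ofList []))
    · rw [if_pos hrow]
      congr 1
      apply List.map_congr_left
      intro j hj
      have hj' := (PySem.List.mem_pyRange_one.mp hj)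
      rw [PySem.Dict.getD_eq_get?_getD,
          pvB_dict_get length width rocks PySem.Dict.empty i j hi'.1 hi'.2 hj'.1 hj'.2]
      by_cases hm : pvMatches rocks i j = []
      · simp [hm, pvCell, PySem.Dict.get?_empty]
      · simp [hm, pvCell, PySem.Dict.getD_empty]
    · rw [if_neg hrow]
      rw [if_pos (show (0:Int) < length by obtain ⟨h1, h2⟩ := hi'; omega)]
      -- a row with no rock: every cell of the row is '.'
      have hcell : ∀ j ∈ PySem.List.pyRange 0 width 1, pvCell rocks i j = "." := by
        intro j hj
        have hj' := (PySem.List.mem_pyRange_one.mp hj)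
        have hm : pvMatches rocks i j = [] := by
          by_contra hne
          obtain ⟨r, hr⟩ := List.exists_mem_of_ne_nil _ hne
          have hr' := List.mem_filter.mp hr
          have hcond := of_decide_eq_true hr'.2
          apply hrow
          rw [hS]
          refine ⟨r, List.mem_filter.mpr ⟨hr'.1, by
            have : 0 ≤ r.1 ∧ r.1 < length ∧ 0 ≤ r.2.1 ∧ r.2.1 < width := by
              obtain ⟨h1, h2⟩ := hcond
              refine ⟨by omega, by omega, by omega, by omega⟩
            exact decide_eq_true this⟩, hcond.1.symm⟩
        simp [pvCell, hm]
      rw [List.map_congr_left hcell, List.map_const', PySem.List.length_pyRange_one]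
      simp
  · -- load component
    show rocks.foldl _ 0 = _
    have hg : (fun (load : Int) (rock : Int × Int × String) =>
        if 0 ≤ rock.1 ∧ rock.1 < length ∧ 0 ≤ rock.2.1 ∧ rock.2.1 < width then
          (if rock.2.2 = "O" then load + (length - rock.1) else load) else load)
        = fun (load : Int) (rock : Int × Int × String) =>
          load + (if 0 ≤ rock.1 ∧ rock.1 < length ∧ 0 ≤ rock.2.1 ∧ rock.2.1 < width then pvH length rock else 0) := by
      funext load rock
      unfold pvH
      split_ifs <;> omega
    rw [hg, PySem.List.foldl_add]
    simp

-- a one-hot sum over range(a, b)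
theorem pvIndicator (v x : Int) :
    ∀ (n : Nat) (a b : Int), (b - a).toNat = n →
    ((PySem.List.pyRange a b 1).map (fun i => if i = v then x else 0)).sum
    = if a ≤ v ∧ v < b then x else 0 := by
  intro n
  induction n with
  | zero =>
      intro a b h
      rw [PySem.List.pyRange_one_eq_nil (by omega)]
      simp only [List.map_nil, List.sum_nil]
      split_ifs with hc
      · omega
      · rfl
  | succ n ih =>
      intro a b h
      rw [PySem.List.pyRange_one_cons (by omega)]
      simp only [List.map_cons, List.sum_cons]
      rw [ih (a + 1) b (by omega)]
      split_ifs <;> omega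

-- the double one-hot sum over the grid collapses to an in-range test
theorem pvIndicator2 (length width : Int) (r : Int × Int × String) :
    ((PySem.List.pyRange 0 length 1).map (fun i =>
      ((PySem.List.pyRange 0 width 1).map (fun j => if r.1 = i ∧ r.2.1 = j then pvH length r else 0)).sum)).sum
    = if 0 ≤ r.1 ∧ r.1 < length ∧ 0 ≤ r.2.1 ∧ r.2.1 < width then pvH length r else 0 := by
  have hin : ∀ i : Int,
      ((PySem.List.pyRange 0 width 1).map (fun j => if r.1 = i ∧ r.2.1 = j then pvH length r else 0)).sum
      = if r.1 = i then (if 0 ≤ r.2.1 ∧ r.2.1 < width then pvH length r else 0) else 0 := by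
    intro i
    by_cases hi : r.1 = i
    · have : (fun j : Int => if r.1 = i ∧ r.2.1 = j then pvH length r else 0)
           = fun j : Int => if j = r.2.1 then pvH length r else 0 := by
        funext j; by_cases hj : r.2.1 = j
        · simp [hi, hj]
        · simp [hi, hj]; intro hc; omega
      rw [this, pvIndicator r.2.1 (pvH length r) (width - 0).toNat 0 width rfl]
      simp [hi]
    · have : (fun j : Int => if r.1 = i ∧ r.2.1 = j then pvH length r else 0)
           = fun _ : Int => (0 : Int) := by
        funext j; simp [hi]
      rw [this]
      simp [hi, PySem.List.sum_map_const_int]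
  have : (fun i : Int =>
      ((PySem.List.pyRange 0 width 1).map (fun j => if r.1 = i ∧ r.2.1 = j then pvH length r else 0)).sum)
      = fun i : Int => if i = r.1 then (if 0 ≤ r.2.1 ∧ r.2.1 < width then pvH length r else 0) else 0 := by
    funext i; rw [hin i]
    by_cases h : r.1 = i
    · simp [h]
    · simp [h]; intro hc; omega
  rw [this, pvIndicator r.1 _ (length - 0).toNat 0 length rfl]
  split_ifs <;> omega

-- exchanging the two summation orders: per grid cell vs per rock
theorem pvLoadSwap (length width : Int) (rocks : List (Int × Int × String)) :
    ((PySem.List.pyRange 0 length 1).map (fun i => ((PySem.List.pyRange 0 width 1).map (pvC rocks length i)).sum)).sum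
    = (rocks.map (fun r => if 0 ≤ r.1 ∧ r.1 < length ∧ 0 ≤ r.2.1 ∧ r.2.1 < width then pvH length r else 0)).sum := by
  induction rocks with
  | nil =>
      simp only [List.map_nil, List.sum_nil]
      have : (fun i : Int => ((PySem.List.pyRange 0 width 1).map (pvC [] length i)).sum)
           = fun _ : Int => (0 : Int) := by
        funext i
        have : pvC ([] : List (Int × Int × String)) length i = fun _ : Int => (0 : Int) := by
          funext j; simp [pvC, pvMatches]
        rw [this]
        simp [PySem.List.sum_map_const_int]
      rw [this]
      simp [PySem.List.sum_map_const_int]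
  | cons r t ih =>
      have hsplit : ∀ i j : Int, pvC (r :: t) length i j
          = (if r.1 = i ∧ r.2.1 = j then pvH length r else 0) + pvC t length i j := by
        intro i j
        by_cases hm : r.1 = i ∧ r.2.1 = j
        · simp [pvC, pvMatches, List.filter_cons, hm]
        · simp [pvC, pvMatches, List.filter_cons, hm]
      have h1 : (fun i : Int => ((PySem.List.pyRange 0 width 1).map (pvC (r :: t) length i)).sum)
          = fun i : Int =>
            ((PySem.List.pyRange 0 width 1).map (fun j => if r.1 = i ∧ r.2.1 = j then pvH length r else 0)).sum
            + ((PySem.List.pyRange 0 width 1).map (pvC t length i)).sum := by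
        funext i
        rw [← PySem.List.sum_map_add_int]
        exact congrArg List.sum (List.map_congr_left (fun j _ => hsplit i j))
      rw [h1, PySem.List.sum_map_add_int, pvIndicator2, ih]
      simp

-- ===== VERDICT (by name: the statement is the Claim_ definition above) =====
theorem construct_plate_spec : Claim_equal_construct_plate := by
  intro rocks length width _
  unfold Spec_construct_plate
  rw [pvA_char, pvB_char, pvLoadSwap]
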